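-- pv_equiv track=rewrite | github.com/HBinhCT/Q-project | hackerearth/Algorithms/GCD Game/solution.py | fighting
-- ===== SOURCE A (Python) =====
-- from math import gcd
--
-- def fighting(p1, p2, turn=0):
--     if p1 == 1:
--         return 1
--     elif p2 == 1:
--         return 0
--     elif p1 == p2:
--         return turn
--     x = gcd(p1, p2)
--     y = x > 1
--     if turn:
--         return (y and (fighting(p1 // x, p2, not turn) == turn)) or (fighting(p1 - 1, p2, not turn) == turn)
--     else:
--         return not ((y and (fighting(p1, p2 // x, not turn) == turn)) or (fighting(p1, p2 - 1, not turn) == turn))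
-- ===== SOURCE B (Python) =====
-- from math import gcd
--
--
-- def fighting(p1, p2, turn=0):
--     # Negamax with memoization: the two-turn recursion of the original collapses,
--     # by the symmetry f(a, b, 0) == 1 - f(b, a, 1), into a single function
--     # win(a, b) = f(a, b, 1), cached per (a, b) pair so each state is solved once.
--     memo = {}
--
--     def win(a, b):
--         if a == 1:
--             return 1
--         if b == 1:
--             return 0
--         if a == b:
--             return 1
--         if (a, b) in memo:
--             return memo[(a, b)]
--         g = gcd(a, b)
--         r = 1 if ((g > 1 and win(b, a // g) == 0) or win(b, a - 1) == 0) else 0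
--         memo[(a, b)] = r
--         return r
--
--     if p1 == 1:
--         return 1
--     if p2 == 1:
--         return 0
--     if p1 == p2:
--         return turn
--     g = gcd(p1, p2)
--     if turn:
--         return (g > 1 and (1 - win(p2, p1 // g)) == turn) or (1 - win(p2, p1 - 1)) == turn
--     else:
--         return not ((g > 1 and win(p1, p2 // g) == 0) or win(p1, p2 - 1) == 0)
-- ===== Notes on version B (the rewrite author's own statement) =====
-- stated objective: alternative
-- what changed: A's two-turn minimax recursion is replaced by a single dict-memoized negamax function win(a,b) obtained from the turn symmetry f(a,b,0) = 1 - f(b,a,1), each (a,b) state solved once; the Lean file proves the ports agree on all p1>=1, p2>=1 (fighting_strong), while Pre_ is restricted to A's int-returning base lines because on recursive inputs both Pythons return bools, outside the Int return-type convention.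
-- outside the precondition, e.g. on fighting(2, 8, 5): A returns False, B returns False; on fighting(6, 10, 0): A returns False, B returns False; on fighting(3, 4, 1): A returns True, B returns True
import Mathlib
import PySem

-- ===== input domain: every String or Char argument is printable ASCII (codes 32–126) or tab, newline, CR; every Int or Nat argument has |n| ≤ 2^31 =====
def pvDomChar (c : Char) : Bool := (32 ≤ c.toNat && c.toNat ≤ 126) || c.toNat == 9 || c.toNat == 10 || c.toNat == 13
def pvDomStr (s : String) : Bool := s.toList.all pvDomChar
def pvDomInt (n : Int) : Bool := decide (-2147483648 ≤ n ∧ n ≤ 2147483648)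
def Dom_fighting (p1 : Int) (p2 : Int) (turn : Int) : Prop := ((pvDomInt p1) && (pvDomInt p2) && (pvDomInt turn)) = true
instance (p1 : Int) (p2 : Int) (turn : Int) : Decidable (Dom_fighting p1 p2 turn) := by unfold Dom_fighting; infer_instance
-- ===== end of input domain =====

-- B replaces A's two-turn minimax recursion by a single negamax function
-- win(a,b) (using the symmetry f(a,b,0) = 1 - f(b,a,1)) memoized in a dict;
-- return values are identical on Pre_ (and on all p1,p2 >= 1: fighting_strong).

-- ===== PORT A =====
-- A's recursion has no structural decrease on Int, so the port threads explicit
-- fuel; on Pre_ the wrapper's fuel (p1+p2).toNat+1 exceeds the recursion depth,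
-- so the fuel-0 branch is never reached.  Python's bool results (True/False)
-- are rendered as the Ints 1/0.
def fightingFuel : Nat → Int → Int → Int → Int
  | 0, _, _, _ => 0
  | n + 1, p1, p2, turn =>
    if p1 = 1 then 1
    else if p2 = 1 then 0
    else if p1 = p2 then turn
    else
      let x : Int := (Int.gcd p1 p2 : Int)   -- math.gcd
      -- y = x > 1 inlined into the conditions below
      if turn ≠ 0 then
        if (1 < x ∧ fightingFuel n (PySem.Int.floordiv p1 x) p2 0 = turn) ∨
            fightingFuel n (p1 - 1) p2 0 = turn then 1 else 0
      else
        if ¬ ((1 < x ∧ fightingFuel n p1 (PySem.Int.floordiv p2 x) 1 = turn) ∨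
            fightingFuel n p1 (p2 - 1) 1 = turn) then 1 else 0

def fighting (p1 : Int) (p2 : Int) (turn : Int) : Int :=
  fightingFuel ((p1 + p2).toNat + 1) p1 p2 turn

-- ===== PORT B =====
-- Source B's inner win(a, b) with its memo dict threaded through in Python
-- evaluation order; same fuel discipline as the A port.
def winFuel : Nat → Int → Int → PySem.Dict (Int × Int) Int →
    Int × PySem.Dict (Int × Int) Int
  | 0, _, _, d => (0, d)
  | n + 1, a, b, d =>
    if a = 1 then (1, d)
    else if b = 1 then (0, d)
    else if a = b then (1, d)
    else
      match d.get? (a, b) with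
      | some v => (v, d)
      | none =>
        let g : Int := (Int.gcd a b : Int)
        let r : Int × PySem.Dict (Int × Int) Int :=
          if 1 < g then
            let p := winFuel n b (PySem.Int.floordiv a g) d
            if p.1 = 0 then (1, p.2)
            else
              let q := winFuel n b (a - 1) p.2
              if q.1 = 0 then (1, q.2) else (0, q.2)
          else
            let q := winFuel n b (a - 1) d
            if q.1 = 0 then (1, q.2) else (0, q.2)
        (r.1, r.2.insert (a, b) r.1)

def fighting_alt (p1 : Int) (p2 : Int) (turn : Int) : Int :=
  if p1 = 1 then 1
  else if p2 = 1 then 0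
  else if p1 = p2 then turn
  else
    let g : Int := (Int.gcd p1 p2 : Int)
    let n : Nat := (p1 + p2).toNat
    let d0 : PySem.Dict (Int × Int) Int := PySem.Dict.empty
    if turn ≠ 0 then
      if 1 < g then
        let p := winFuel n p2 (PySem.Int.floordiv p1 g) d0
        if 1 - p.1 = turn then 1
        else
          let q := winFuel n p2 (p1 - 1) p.2
          if 1 - q.1 = turn then 1 else 0
      else
        let q := winFuel n p2 (p1 - 1) d0
        if 1 - q.1 = turn then 1 else 0
    else
      if 1 < g then
        let p := winFuel n p1 (PySem.Int.floordiv p2 g) d0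
        if p.1 = 0 then 0
        else
          let q := winFuel n p1 (p2 - 1) p.2
          if q.1 = 0 then 0 else 1
      else
        let q := winFuel n p1 (p2 - 1) d0
        if q.1 = 0 then 0 else 1

-- ===== PRECONDITION & SPEC =====
-- Pre_ admits exactly the inputs where A returns a value of the declared Int
-- return type (1, 0, or turn): on every input reaching the recursive branches
-- both A and B return a Python bool True/False (an int 0/1 in Python but outside
-- the Int convention this file's ports are typed in), so those inputs must lie
-- outside Pre_; A and B still agree there — fighting_strong below proves the
-- ports equal (as the 0/1 renderings of those bools) on ALL p1 ≥ 1, p2 ≥ 1.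
def Pre_fighting (p1 : Int) (p2 : Int) (turn : Int) : Prop :=
  p1 = 1 ∨ p2 = 1 ∨ p1 = p2
instance (p1 : Int) (p2 : Int) (turn : Int) : Decidable (Pre_fighting p1 p2 turn) := by
  unfold Pre_fighting; infer_instance
def pvWitness_fighting : Int × Int × Int := (1, 5, 0)

def Spec_fighting (p1 : Int) (p2 : Int) (turn : Int) (out : Int) : Prop := out = fighting_alt p1 p2 turn
instance (p1 : Int) (p2 : Int) (turn : Int) (out : Int) : Decidable (Spec_fighting p1 p2 turn out) := by unfold Spec_fighting; infer_instance

-- ===== CLAIM (what is proved, stated in full; the proofs are below) =====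
def Claim_equal_fighting : Prop := ∀ (p1 : Int) (p2 : Int) (turn : Int), Dom_fighting p1 p2 turn → Pre_fighting p1 p2 turn → Spec_fighting p1 p2 turn (fighting p1 p2 turn)

-- ===== LEMMAS AND PROOFS =====

-- gcd-quotient bounds: for 2 <= a and g = gcd(a,b) > 1, 1 <= a // g < a.
theorem fd_bounds (a b : Int) (ha : 2 ≤ a)
    (hg : 1 < (Int.gcd a b : Int)) :
    1 ≤ PySem.Int.floordiv a (Int.gcd a b) ∧
      PySem.Int.floordiv a (Int.gcd a b) < a := by
  have hdvd : ((Int.gcd a b : Int)) ∣ a := Int.gcd_dvd_left a b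
  have hle : (Int.gcd a b : Int) ≤ a := Int.le_of_dvd (by omega) hdvd
  constructor
  · rw [PySem.Int.le_floordiv_iff_mul_le (by omega)]
    omega
  · rw [PySem.Int.floordiv_lt_iff_lt_mul (by omega)]
    nlinarith

-- Fuel irrelevance: any fuel at least p1+p2 gives the same value.
theorem fightingFuel_stable (n : Nat) : ∀ (m : Nat) (a b t : Int), 1 ≤ a → 1 ≤ b →
    (a + b).toNat ≤ n → (a + b).toNat ≤ m →
    fightingFuel n a b t = fightingFuel m a b t := by
  induction n with
  | zero => intro m a b t ha hb hn _; omega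
  | succ n ih =>
      intro m a b t ha hb hn hm
      cases m with
      | zero => omega
      | succ m =>
          by_cases h1 : a = 1
          · simp [fightingFuel, h1]
          by_cases h2 : b = 1
          · simp [fightingFuel, h1, h2]
          by_cases h3 : a = b
          · simp [fightingFuel, h1, h2, h3]
          have ha2 : 2 ≤ a := by omega
          have hb2 : 2 ≤ b := by omega
          by_cases hx : 1 < (Int.gcd a b : Int)
          · have hfa := fd_bounds a b ha2 hx
            have hfb := fd_bounds b a hb2 (by rw [Int.gcd_comm b a]; exact hx)
            rw [Int.gcd_comm b a] at hfb
            have e1 := ih m (PySem.Int.floordiv a (Int.gcd a b)) b 0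
              (by omega) hb (by omega) (by omega)
            have e2 := ih m (a - 1) b 0 (by omega) hb (by omega) (by omega)
            have e3 := ih m a (PySem.Int.floordiv b (Int.gcd a b)) 1
              ha (by omega) (by omega) (by omega)
            have e4 := ih m a (b - 1) 1 ha (by omega) (by omega) (by omega)
            simp only [fightingFuel, h1, h2, h3, if_false, e1, e2, e3, e4]
          · have e2 := ih m (a - 1) b 0 (by omega) hb (by omega) (by omega)
            have e4 := ih m a (b - 1) 1 ha (by omega) (by omega) (by omega)
            simp only [fightingFuel, h1, h2, h3, if_false, hx, false_and,
              false_or, e2, e4]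

-- The canonical value of the turn-1 game (fuel = its own measure).
def Wv (a b : Int) : Int := fightingFuel ((a + b).toNat) a b 1

theorem Wv_eq_fuel (n : Nat) (a b : Int) (ha : 1 ≤ a) (hb : 1 ≤ b)
    (hn : (a + b).toNat ≤ n) : fightingFuel n a b 1 = Wv a b :=
  fightingFuel_stable n ((a + b).toNat) a b 1 ha hb hn (le_refl _)

-- Turn symmetry: f(a,b,0) = 1 - f(b,a,1) for 1 <= a, 2 <= b.
theorem fighting_swap (n : Nat) : ∀ (a b : Int), 1 ≤ a → 2 ≤ b →
    (a + b).toNat ≤ n →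
    fightingFuel n a b 0 = 1 - fightingFuel n b a 1 := by
  induction n with
  | zero => intro a b ha hb hn; omega
  | succ n ih =>
      intro a b ha hb hn
      by_cases h1 : a = 1
      · simp [fightingFuel, h1, show b ≠ 1 by omega]
      by_cases h3 : a = b
      · simp [fightingFuel, h3, show b ≠ 1 by omega]
      have ha2 : 2 ≤ a := by omega
      have hgc : ((Int.gcd b a : Int) : Int) = ((Int.gcd a b : Int) : Int) := by
        rw [Int.gcd_comm b a]
      have e2 : fightingFuel n (b - 1) a 0 = 1 - fightingFuel n a (b - 1) 1 :=
        ih (b - 1) a (by omega) ha2 (by omega)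
      have key : 1 < (Int.gcd a b : Int) →
          fightingFuel n (PySem.Int.floordiv b (Int.gcd a b)) a 0 =
            1 - fightingFuel n a (PySem.Int.floordiv b (Int.gcd a b)) 1 := by
        intro hx
        have hfb := fd_bounds b a hb (by rw [Int.gcd_comm b a]; exact hx)
        rw [Int.gcd_comm b a] at hfb
        exact ih _ a (by omega) ha2 (by omega)
      simp only [fightingFuel, h1, h3, show b ≠ 1 by omega, show b ≠ a from fun h => h3 h.symm,
        if_false, ite_false, hgc, ne_eq, OfNat.zero_ne_ofNat, not_false_eq_true,
        one_ne_zero, if_true, ite_true, not_true_eq_false, zero_ne_one,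
        not_not, e2]
      by_cases hC : (1 < (Int.gcd a b : Int) ∧
          fightingFuel n a (PySem.Int.floordiv b (Int.gcd a b)) 1 = 0) ∨
          fightingFuel n a (b - 1) 1 = 0
      · rw [if_neg (not_not_intro hC), if_pos (by
          rcases hC with ⟨h, hv⟩ | hv
          · exact Or.inl ⟨h, by rw [key h]; omega⟩
          · exact Or.inr (by omega))]
        norm_num
      · rw [if_pos hC, if_neg (fun hcc => hC (by
          rcases hcc with ⟨h, hv⟩ | hv
          · exact Or.inl ⟨h, by rw [key h] at hv; omega⟩
          · exact Or.inr (by omega)))]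
        norm_num

-- Base-case values of Wv.
theorem Wv_one_left (b : Int) (hb : 1 ≤ b) : Wv 1 b = 1 := by
  have h : (1 + b).toNat = ((1 + b).toNat - 1) + 1 := by omega
  rw [Wv, h]; simp [fightingFuel]

theorem Wv_one_right (a : Int) (ha : 2 ≤ a) : Wv a 1 = 0 := by
  have h : (a + 1).toNat = ((a + 1).toNat - 1) + 1 := by omega
  rw [Wv, h]; simp [fightingFuel, show a ≠ 1 by omega]

theorem Wv_diag (a : Int) (ha : 2 ≤ a) : Wv a a = 1 := by
  have h : (a + a).toNat = ((a + a).toNat - 1) + 1 := by omega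
  rw [Wv, h]; simp [fightingFuel, show a ≠ 1 by omega]

-- Recursive characterisation of Wv, phrased negamax-style (the shape of B).
theorem Wv_rec (a b : Int) (ha : 2 ≤ a) (hb : 2 ≤ b) (hne : a ≠ b) :
    Wv a b = if (1 < (Int.gcd a b : Int) ∧
        Wv b (PySem.Int.floordiv a (Int.gcd a b)) = 0) ∨ Wv b (a - 1) = 0
      then 1 else 0 := by
  have h : (a + b).toNat = ((a + b).toNat - 1) + 1 := by omega
  set n : Nat := (a + b).toNat - 1 with hn
  have e2 : fightingFuel n (a - 1) b 0 = 1 - Wv b (a - 1) := by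
    rw [fighting_swap n _ b (by omega) hb (by omega),
      Wv_eq_fuel n b _ (by omega) (by omega) (by omega)]
  have key : 1 < (Int.gcd a b : Int) →
      fightingFuel n (PySem.Int.floordiv a (Int.gcd a b)) b 0 =
        1 - Wv b (PySem.Int.floordiv a (Int.gcd a b)) := by
    intro hx
    have hfa := fd_bounds a b ha hx
    rw [fighting_swap n _ b (by omega) hb (by omega),
      Wv_eq_fuel n b _ (by omega) (by omega) (by omega)]
  rw [Wv, h]
  simp only [fightingFuel, show a ≠ 1 by omega, show b ≠ 1 by omega, hne,
    if_false, ite_false, ne_eq, one_ne_zero, not_false_eq_true, if_true,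
    ite_true, e2]
  by_cases hC : (1 < (Int.gcd a b : Int) ∧
      Wv b (PySem.Int.floordiv a (Int.gcd a b)) = 0) ∨ Wv b (a - 1) = 0
  · rw [if_pos (by
      rcases hC with ⟨hg, hv⟩ | hv
      · exact Or.inl ⟨hg, by rw [key hg]; omega⟩
      · exact Or.inr (by omega)), if_pos hC]
  · rw [if_neg (fun hcc => hC (by
      rcases hcc with ⟨hg, hv⟩ | hv
      · exact Or.inl ⟨hg, by rw [key hg] at hv; omega⟩
      · exact Or.inr (by omega))), if_neg hC]

-- Memo-dict invariant: every stored value is the game value of its key.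
def DictInv (d : PySem.Dict (Int × Int) Int) : Prop :=
  ∀ a b v, d.get? (a, b) = some v → v = Wv a b

theorem DictInv_empty : DictInv PySem.Dict.empty := by
  intro a b v h
  simp [PySem.Dict.get?_empty] at h

theorem DictInv_insert (d : PySem.Dict (Int × Int) Int) (hd : DictInv d)
    (a b : Int) : DictInv (d.insert (a, b) (Wv a b)) := by
  intro a' b' v h
  by_cases hk : ((a', b') : Int × Int) = (a, b)
  · rw [hk, PySem.Dict.get?_insert_self] at h
    cases h
    obtain ⟨h1, h2⟩ := Prod.mk.injEq .. ▸ hk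
    rw [h1, h2]
  · rw [PySem.Dict.get?_insert_of_ne _ _ hk] at h
    exact hd _ _ _ h

-- Correctness of the memoized negamax loop.
theorem winFuel_correct (n : Nat) : ∀ (a b : Int) (d : PySem.Dict (Int × Int) Int),
    1 ≤ a → 1 ≤ b → (a + b).toNat ≤ n → DictInv d →
    (winFuel n a b d).1 = Wv a b ∧ DictInv (winFuel n a b d).2 := by
  induction n with
  | zero => intro a b d ha hb hn _; omega
  | succ n ih =>
      intro a b d ha hb hn hd
      by_cases h1 : a = 1
      · subst h1; simp only [winFuel, if_true]
        exact ⟨(Wv_one_left b hb).symm, hd⟩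
      by_cases h2 : b = 1
      · subst h2; simp only [winFuel, h1, if_false, if_true]
        exact ⟨(Wv_one_right a (by omega)).symm, hd⟩
      by_cases h3 : a = b
      · subst h3; simp only [winFuel, h1, h2, if_false, if_true]
        exact ⟨(Wv_diag a (by omega)).symm, hd⟩
      have ha2 : 2 ≤ a := by omega
      have hb2 : 2 ≤ b := by omega
      cases hget : d.get? (a, b) with
      | some v =>
          simp only [winFuel, h1, h2, h3, if_false, hget]
          exact ⟨hd a b v hget, hd⟩
      | none =>
          have hWrec := Wv_rec a b ha2 hb2 h3
          by_cases hx : 1 < (Int.gcd a b : Int)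
          · have hfa := fd_bounds a b ha2 hx
            obtain ⟨hp1, hp2⟩ := ih b (PySem.Int.floordiv a (Int.gcd a b)) d
              hb (by omega) (by omega) hd
            by_cases hp0 : (winFuel n b (PySem.Int.floordiv a (Int.gcd a b)) d).1 = 0
            · have hWv : Wv a b = 1 := by
                rw [hWrec, if_pos (Or.inl ⟨hx, by rw [← hp1]; exact hp0⟩)]
              simp only [winFuel, h1, h2, h3, if_false, hget, hx, if_true,
                ite_true, hp0]
              refine ⟨hWv.symm, ?_⟩
              have hins := DictInv_insert _ hp2 a b
              rwa [hWv] at hins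
            · obtain ⟨hq1, hq2⟩ := ih b (a - 1)
                (winFuel n b (PySem.Int.floordiv a (Int.gcd a b)) d).2
                hb (by omega) (by omega) hp2
              by_cases hq0 : (winFuel n b (a - 1)
                  (winFuel n b (PySem.Int.floordiv a (Int.gcd a b)) d).2).1 = 0
              · have hWv : Wv a b = 1 := by
                  rw [hWrec, if_pos (Or.inr (by rw [← hq1]; exact hq0))]
                simp only [winFuel, h1, h2, h3, if_false, hget, hx, if_true,
                  ite_true, hp0, ite_false, hq0]
                refine ⟨hWv.symm, ?_⟩
                have hins := DictInv_insert _ hq2 a b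
                rwa [hWv] at hins
              · have hWv : Wv a b = 0 := by
                  rw [hWrec, if_neg ?_]
                  rintro (⟨_, hv⟩ | hv)
                  · exact hp0 (by rw [hp1]; exact hv)
                  · exact hq0 (by rw [hq1]; exact hv)
                simp only [winFuel, h1, h2, h3, if_false, hget, hx, if_true,
                  ite_true, hp0, ite_false, hq0]
                refine ⟨hWv.symm, ?_⟩
                have hins := DictInv_insert _ hq2 a b
                rwa [hWv] at hins
          · obtain ⟨hq1, hq2⟩ := ih b (a - 1) d hb (by omega) (by omega) hd
            by_cases hq0 : (winFuel n b (a - 1) d).1 = 0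
            · have hWv : Wv a b = 1 := by
                rw [hWrec, if_pos (Or.inr (by rw [← hq1]; exact hq0))]
              simp only [winFuel, h1, h2, h3, if_false, hget, hx, ite_false,
                hq0, ite_true]
              refine ⟨hWv.symm, ?_⟩
              have hins := DictInv_insert _ hq2 a b
              rwa [hWv] at hins
            · have hWv : Wv a b = 0 := by
                rw [hWrec, if_neg ?_]
                rintro (⟨hg, _⟩ | hv)
                · exact hx hg
                · exact hq0 (by rw [hq1]; exact hv)
              simp only [winFuel, h1, h2, h3, if_false, hget, hx, ite_false,
                hq0]
              refine ⟨hWv.symm, ?_⟩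
              have hins := DictInv_insert _ hq2 a b
              rwa [hWv] at hins

-- Full agreement of the two ports on the game's whole domain p1 ≥ 1, p2 ≥ 1
-- (strictly stronger than the Pre_-restricted claim: it also covers the inputs
-- where the Pythons return bools, rendered 0/1 by both ports identically).
theorem fighting_strong (p1 p2 turn : Int) (hp1 : 1 ≤ p1) (hp2 : 1 ≤ p2) :
    fighting p1 p2 turn = fighting_alt p1 p2 turn := by
  by_cases h1 : p1 = 1
  · simp [fighting, fighting_alt, fightingFuel, h1]
  by_cases h2 : p2 = 1
  · simp [fighting, fighting_alt, fightingFuel, h1, h2]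
  by_cases h3 : p1 = p2
  · simp [fighting, fighting_alt, fightingFuel, h1, h2, h3]
  have ha2 : 2 ≤ p1 := by omega
  have hb2 : 2 ≤ p2 := by omega
  by_cases ht : turn = 0
  · -- turn == 0 branch: A negates the disjunction; B mirrors it through win
    subst ht
    have e2 : fightingFuel ((p1 + p2).toNat) p1 (p2 - 1) 1 = Wv p1 (p2 - 1) :=
      Wv_eq_fuel _ _ _ (by omega) (by omega) (by omega)
    by_cases hx : 1 < (Int.gcd p1 p2 : Int)
    · have hfb := fd_bounds p2 p1 hb2 (by rw [Int.gcd_comm p2 p1]; exact hx)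
      rw [Int.gcd_comm p2 p1] at hfb
      have e1 : fightingFuel ((p1 + p2).toNat) p1
          (PySem.Int.floordiv p2 (Int.gcd p1 p2)) 1 =
          Wv p1 (PySem.Int.floordiv p2 (Int.gcd p1 p2)) :=
        Wv_eq_fuel _ _ _ (by omega) (by omega) (by omega)
      obtain ⟨hp, hdp⟩ := winFuel_correct ((p1 + p2).toNat) p1
        (PySem.Int.floordiv p2 (Int.gcd p1 p2)) PySem.Dict.empty
        (by omega) (by omega) (by omega) DictInv_empty
      obtain ⟨hq, _⟩ := winFuel_correct ((p1 + p2).toNat) p1 (p2 - 1) _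
        (by omega) (by omega) (by omega) hdp
      simp only [fighting, fighting_alt, fightingFuel, h1, h2, h3, if_false,
        ite_false, ne_eq, not_true_eq_false, not_false_eq_true, if_true,
        ite_true, hx, e1, e2, hp, hq]
      by_cases c1 : Wv p1 (PySem.Int.floordiv p2 (Int.gcd p1 p2)) = 0 <;>
        by_cases c2 : Wv p1 (p2 - 1) = 0 <;>
        simp [c1, c2, hx]
    · obtain ⟨hq, _⟩ := winFuel_correct ((p1 + p2).toNat) p1 (p2 - 1)
        PySem.Dict.empty (by omega) (by omega) (by omega) DictInv_empty
      simp only [fighting, fighting_alt, fightingFuel, h1, h2, h3, if_false,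
        ite_false, ne_eq, not_true_eq_false, not_false_eq_true, if_true,
        ite_true, hx, false_and, false_or, e2, hq]
      by_cases c2 : Wv p1 (p2 - 1) = 0 <;> simp [c2, hx]
  · -- turn != 0 branch
    have e2 : fightingFuel ((p1 + p2).toNat) (p1 - 1) p2 0 =
        1 - Wv p2 (p1 - 1) := by
      rw [fighting_swap _ _ p2 (by omega) hb2 (by omega),
        Wv_eq_fuel _ p2 _ (by omega) (by omega) (by omega)]
    by_cases hx : 1 < (Int.gcd p1 p2 : Int)
    · have hfa := fd_bounds p1 p2 ha2 hx
      have e1 : fightingFuel ((p1 + p2).toNat)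
          (PySem.Int.floordiv p1 (Int.gcd p1 p2)) p2 0 =
          1 - Wv p2 (PySem.Int.floordiv p1 (Int.gcd p1 p2)) := by
        rw [fighting_swap _ _ p2 (by omega) hb2 (by omega),
          Wv_eq_fuel _ p2 _ (by omega) (by omega) (by omega)]
      obtain ⟨hp, hdp⟩ := winFuel_correct ((p1 + p2).toNat) p2
        (PySem.Int.floordiv p1 (Int.gcd p1 p2)) PySem.Dict.empty
        (by omega) (by omega) (by omega) DictInv_empty
      obtain ⟨hq, _⟩ := winFuel_correct ((p1 + p2).toNat) p2 (p1 - 1) _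
        (by omega) (by omega) (by omega) hdp
      simp only [fighting, fighting_alt, fightingFuel, h1, h2, h3, if_false,
        ite_false, ne_eq, ht, not_false_eq_true, if_true, ite_true, hx,
        e1, e2, hp, hq]
      by_cases c1 : 1 - Wv p2 (PySem.Int.floordiv p1 (Int.gcd p1 p2)) = turn <;>
        by_cases c2 : 1 - Wv p2 (p1 - 1) = turn <;>
        simp [c1, c2, hx]
    · obtain ⟨hq, _⟩ := winFuel_correct ((p1 + p2).toNat) p2 (p1 - 1)
        PySem.Dict.empty (by omega) (by omega) (by omega) DictInv_empty
      simp only [fighting, fighting_alt, fightingFuel, h1, h2, h3, if_false,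
        ite_false, ne_eq, ht, not_false_eq_true, if_true, ite_true, hx,
        false_and, false_or, e2, hq]

-- ===== VERDICT (by name: the statement is the Claim_ definition above) =====
theorem fighting_spec : Claim_equal_fighting := by
  intro p1 p2 turn _ hpre
  show fighting p1 p2 turn = fighting_alt p1 p2 turn
  by_cases hpos : 1 ≤ p1 ∧ 1 ≤ p2
  · exact fighting_strong p1 p2 turn hpos.1 hpos.2
  · rcases hpre with h1 | h2 | h3
    · simp [fighting, fighting_alt, fightingFuel, h1]
    · simp [fighting, fighting_alt, fightingFuel, h2]
    · simp [fighting, fighting_alt, fightingFuel, h3]
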